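-- pv_equiv track=rewrite | github.com/nothingct/BOJ-CT-EX | 연습/비트마스크/가르침/가르침.py | solve
-- ===== SOURCE A (Python) =====
-- def readWords(mask,words):
--   cnt= 0
--   for word in words :
--     if (word & (1<<26)-1-mask)==0: cnt+=1
--   return cnt
--
-- def solve(index,k, learned, words):
--   if k < 0 : return 0
--   if index==26: return readWords(learned,words)
--   ans = 0
--   temp =0
--   #a,n,t,i,c아니어서 배우는 경우.
--   if index not in [ord('a')-ord('a') , ord('n')-ord('a'),ord('t')-ord('a'),ord('i')-ord('a'),ord('c')-ord('a')]:
--     temp = solve(index+1, k-1, learned | (1 << index), words)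
--     ans=max(ans,temp)
--   #a,n,t,i,c는 이미 배워서 배울 필요 없고, a,n,t,i,c아닌데 그냥 안배우는경우
--   temp = solve(index+1,k, learned,words)
--   ans = max(ans,temp)
--   return ans
-- ===== SOURCE B (Python) =====
-- # B: iterative breadth-first subset enumeration instead of branch recursion.
-- # Builds, with one accumulator list, every learnable letter-mask of size <= k
-- # over the non-'antic' letters from index on, then takes the best count.
-- def solve(index, k, learned, words):
--     if k < 0:
--         return 0
--     antic = {ord(c) - ord('a') for c in 'antic'}
--     candidates = [(learned, 0)]
--     for i in range(index, 26):
--         if i in antic: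
--             continue
--         candidates += [(m | (1 << i), c + 1) for (m, c) in candidates if c + 1 <= k]
--     full = (1 << 26) - 1
--     return max(sum(1 for w in words if w & (full - m) == 0) for (m, _) in candidates)
-- ===== Notes on version B (the rewrite author's own statement) =====
-- stated objective: alternative
-- what changed: Replaces A's branch-per-letter recursion (learn / skip each remaining non-'antic' letter) by an iterative breadth-first enumeration: one accumulator list of (mask, letters-used) candidates is grown over range(index, 26) and the best readable-word count is taken in a single max over it.
-- outside the precondition, e.g. on solve(-1, 0, 0, []): A raises ValueError, B returns 0; on solve(27, 0, 0, []): A raises RecursionError, B returns 0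
import Mathlib
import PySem

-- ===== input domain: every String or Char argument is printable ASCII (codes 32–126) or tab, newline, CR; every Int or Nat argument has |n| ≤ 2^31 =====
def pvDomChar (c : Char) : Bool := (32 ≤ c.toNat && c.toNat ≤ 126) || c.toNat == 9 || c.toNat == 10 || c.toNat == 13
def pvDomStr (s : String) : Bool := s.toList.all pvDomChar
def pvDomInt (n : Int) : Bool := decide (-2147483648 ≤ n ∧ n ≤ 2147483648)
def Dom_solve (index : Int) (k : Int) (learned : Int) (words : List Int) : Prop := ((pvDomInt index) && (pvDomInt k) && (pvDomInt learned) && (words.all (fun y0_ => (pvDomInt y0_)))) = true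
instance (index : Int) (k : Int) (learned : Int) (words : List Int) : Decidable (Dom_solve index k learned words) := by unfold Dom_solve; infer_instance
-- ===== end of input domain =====

-- B replaces A's branch-per-letter recursion by an iterative breadth-first enumeration of all
-- learnable letter-masks with one accumulator list (objective: alternative decomposition, same cost).

-- ===== PORT A =====
def readWords (mask : Int) (words : List Int) : Int :=
  words.foldl (fun cnt word =>
    if PySem.Int.band word ((1 : Int) <<< (26 : Nat) - 1 - mask) = 0 then cnt + 1 else cnt) 0

-- fuel = (26 - index).toNat; the fuel-0 fallback is unreachable on Pre_ (it only totalizes the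
-- recursion: Python diverges for index > 26 and raises for index < 0, both outside Pre_).
-- index.toNat in the shift is exact on Pre_ (there 0 ≤ index; Python raises on a negative shift).
def solveAux : Nat → Int → Int → Int → List Int → Int
  | fuel, index, k, learned, words =>
    if k < 0 then 0
    else if index = 26 then readWords learned words
    else
      match fuel with
      | 0 => 0
      | f + 1 =>
        let ans : Int := 0
        let ans := if index ∉ ([0, 13, 19, 8, 2] : List Int) then
            max ans (solveAux f (index + 1) (k - 1) (PySem.Int.bor learned ((1 : Int) <<< index.toNat)) words)
          else ans
        max ans (solveAux f (index + 1) k learned words)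

def solve (index : Int) (k : Int) (learned : Int) (words : List Int) : Int :=
  solveAux (26 - index).toNat index k learned words

-- ===== PORT B =====
-- {ord(c) - ord('a') for c in 'antic'} evaluates to this set (a=0, n=13, t=19, i=8, c=2)
def anticSet : PySem.Set Int := PySem.Set.ofList [0, 13, 19, 8, 2]

def solve_alt (index : Int) (k : Int) (learned : Int) (words : List Int) : Int :=
  if k < 0 then 0
  else
    let candidates : List (Int × Int) :=
      (PySem.List.pyRange index 26 1).foldl (fun cand i =>
        if anticSet.contains i then cand
        else cand ++ cand.filterMap (fun p =>
          if p.2 + 1 ≤ k then some (PySem.Int.bor p.1 ((1 : Int) <<< i.toNat), p.2 + 1) else none))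
        [(learned, 0)]
    -- max over a generator of counts; candidates is never empty (the [] arm only totalizes)
    match candidates.map (fun p =>
        ((words.countP (fun w =>
          decide (PySem.Int.band w ((1 : Int) <<< (26 : Nat) - 1 - p.1) = 0))) : Int)) with
    | [] => 0
    | v :: vs => vs.foldl max v

-- ===== PRECONDITION & SPEC =====
-- Pre_ excludes exactly the inputs where Python A does not return: for k ≥ 0 it raises
-- ValueError (1 << index) when index < 0 and recurses forever (RecursionError) when index > 26.
def Pre_solve (index : Int) (k : Int) (learned : Int) (words : List Int) : Prop :=
  k < 0 ∨ (0 ≤ index ∧ index ≤ 26)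
instance (index : Int) (k : Int) (learned : Int) (words : List Int) : Decidable (Pre_solve index k learned words) := by unfold Pre_solve; infer_instance

def pvWitness_solve : Int × Int × Int × List Int := (22, 2, 0, [41943040, 12582912])

def Spec_solve (index : Int) (k : Int) (learned : Int) (words : List Int) (out : Int) : Prop := out = solve_alt index k learned words
instance (index : Int) (k : Int) (learned : Int) (words : List Int) (out : Int) : Decidable (Spec_solve index k learned words out) := by unfold Spec_solve; infer_instance

-- ===== CLAIM (what is proved, stated in full; the proofs are below) =====
def Claim_equal_solve : Prop := ∀ (index : Int) (k : Int) (learned : Int) (words : List Int), Dom_solve index k learned words → Pre_solve index k learned words → Spec_solve index k learned words (solve index k learned words)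

-- ===== LEMMAS AND PROOFS =====

-- the letters still available from position `index` on (common reference point of both proofs)
def optsOf (index : Int) : List Int :=
  (PySem.List.pyRange index 26 1).filter (fun i => !([0, 13, 19, 8, 2] : List Int).contains i)

-- reference function: best readable-word count using ≤ k letters from the list os, start mask l
def best : List Int → Int → Int → List Int → Int
  | [], _, l, words => readWords l words
  | i :: os, k, l, words =>
    if 1 ≤ k then
      max (best os (k - 1) (PySem.Int.bor l ((1 : Int) <<< i.toNat)) words) (best os k l words)
    else best os k l words


def M0 (L : List Int) : Int := L.foldl max 0

theorem foldl_max_shift : ∀ (L : List Int) (x : Int), 0 ≤ x → L.foldl max x = max x (M0 L) := by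
  intro L
  induction L with
  | nil => intro x hx; simp [M0]; omega
  | cons a L ih =>
    intro x hx
    have h1 := ih (max x a) (by omega)
    have h2 := ih (max 0 a) (by omega)
    simp only [List.foldl_cons, M0] at *
    omega

theorem M0_nonneg (L : List Int) : 0 ≤ M0 L := by
  have := foldl_max_shift L 0 le_rfl
  simp only [M0] at *
  omega

theorem M0_cons (x : Int) (L : List Int) (hx : 0 ≤ x) : M0 (x :: L) = max x (M0 L) := by
  have := foldl_max_shift L (max 0 x) (by omega)
  simp only [M0, List.foldl_cons] at *
  omega

theorem M0_append (a b : List Int) : M0 (a ++ b) = max (M0 a) (M0 b) := by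
  have h := foldl_max_shift b (M0 a) (M0_nonneg a)
  simp only [M0, List.foldl_append] at *
  exact h

theorem foldl_count_acc (C : Int) : ∀ (words : List Int) (c : Int),
    words.foldl (fun cnt word => if PySem.Int.band word C = 0 then cnt + 1 else cnt) c
      = c + (words.countP (fun w => decide (PySem.Int.band w C = 0)) : Int) := by
  intro words
  induction words with
  | nil => intro c; simp
  | cons w ws ih =>
    intro c
    simp only [List.foldl_cons, List.countP_cons, ih]
    by_cases h : PySem.Int.band w C = 0 <;> simp [h] <;> try omega

theorem readWords_eq_countP (mask : Int) (words : List Int) :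
    readWords mask words
      = (words.countP (fun w => decide (PySem.Int.band w ((1 : Int) <<< (26 : Nat) - 1 - mask) = 0)) : Int) := by
  have := foldl_count_acc ((1 : Int) <<< (26 : Nat) - 1 - mask) words 0
  simpa [readWords] using this

theorem readWords_nonneg (mask : Int) (words : List Int) : 0 ≤ readWords mask words := by
  rw [readWords_eq_countP]; positivity

theorem best_nonneg : ∀ (os : List Int) (k l : Int) (w : List Int), 0 ≤ best os k l w := by
  intro os
  induction os with
  | nil => intro k l w; exact readWords_nonneg l w
  | cons i os ih =>
    intro k l w
    simp only [best]
    split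
    · exact le_trans (ih k l w) (le_max_right _ _)
    · exact ih k l w

theorem solveAux_neg (fuel : Nat) (index k l : Int) (w : List Int) (hk : k < 0) :
    solveAux fuel index k l w = 0 := by
  cases fuel <;> (simp only [solveAux]; rw [if_pos hk])

-- A's recursion computes `best` over the remaining optional letters
theorem solveAux_eq_best : ∀ (fuel : Nat) (index k l : Int) (w : List Int),
    index = 26 - (fuel : Int) → 0 ≤ index → 0 ≤ k →
    solveAux fuel index k l w = best (optsOf index) k l w := by
  intro fuel
  induction fuel with
  | zero =>
    intro index k l w hidx _ hk
    have h26 : index = 26 := by simpa using hidx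
    subst h26
    simp only [solveAux, if_neg (by omega : ¬ k < 0), optsOf,
      PySem.List.pyRange_one_eq_nil (by omega : (26:Int) ≤ 26), List.filter_nil, best]
    simp
  | succ f ih =>
    intro index k l w hidx hpos hk
    have hlt : index < 26 := by omega
    have hne : index ≠ 26 := by omega
    have hrec : index + 1 = 26 - (f : Int) := by push_cast at hidx ⊢; omega
    have hopts : optsOf index
        = if ([0, 13, 19, 8, 2] : List Int).contains index = true
          then optsOf (index + 1)
          else index :: optsOf (index + 1) := by
      rw [optsOf, PySem.List.pyRange_one_cons hlt, List.filter_cons]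
      cases hb : (([0, 13, 19, 8, 2] : List Int).contains index) <;> simp [optsOf]
    have ht2 : solveAux f (index + 1) k l w = best (optsOf (index + 1)) k l w :=
      ih (index + 1) k l w hrec (by omega) hk
    simp only [solveAux, if_neg (by omega : ¬ k < 0), if_neg hne]
    by_cases hmem : index ∈ ([0, 13, 19, 8, 2] : List Int)
    · -- letter of 'antic': only the skip branch
      have hc : ([0, 13, 19, 8, 2] : List Int).contains index = true :=
        List.contains_iff_mem.mpr hmem
      rw [hopts, if_pos hc]
      have hnn : ¬ (index ∉ ([0, 13, 19, 8, 2] : List Int)) := not_not_intro hmem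
      simp only [if_neg hnn]
      rw [ht2]
      have := best_nonneg (optsOf (index + 1)) k l w
      omega
    · have hc : ¬ ([0, 13, 19, 8, 2] : List Int).contains index = true := by
        simpa [List.contains_iff_mem] using hmem
      rw [hopts, if_neg hc]
      simp only [if_pos (hmem : index ∉ ([0, 13, 19, 8, 2] : List Int))]
      by_cases hk1 : 1 ≤ k
      · have ht1 : solveAux f (index + 1) (k - 1) (PySem.Int.bor l ((1 : Int) <<< index.toNat)) w
            = best (optsOf (index + 1)) (k - 1) (PySem.Int.bor l ((1 : Int) <<< index.toNat)) w :=
          ih (index + 1) (k - 1) _ w hrec (by omega) (by omega)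
        rw [ht1, ht2]
        simp only [best, if_pos hk1]
        have h1 := best_nonneg (optsOf (index + 1)) (k - 1) (PySem.Int.bor l ((1 : Int) <<< index.toNat)) w
        have h2 := best_nonneg (optsOf (index + 1)) k l w
        omega
      · -- k = 0: the learn branch hits the k < 0 guard and returns 0
        have hk0 : k = 0 := by omega
        have ht1 : solveAux f (index + 1) (k - 1) (PySem.Int.bor l ((1 : Int) <<< index.toNat)) w = 0 :=
          solveAux_neg f _ _ _ w (by omega)
        rw [ht1, ht2]
        simp only [best, if_neg hk1]
        have := best_nonneg (optsOf (index + 1)) k l w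
        omega

-- a foldl that skips on p equals the foldl over the filtered list
theorem foldl_if_skip {α β : Type} (p : β → Bool) (g : α → β → α) :
    ∀ (L : List β) (c : α),
      L.foldl (fun c i => if p i then c else g c i) c = (L.filter (fun i => !p i)).foldl g c := by
  intro L
  induction L with
  | nil => intro c; rfl
  | cons a L ih =>
    intro c
    by_cases h : p a = true <;> simp [h, ih]

-- one fold step matched against one `best` step, pointwise over the candidate list
theorem pair_step (w : List Int) (k i : Int) (os : List Int) :
    ∀ cand : List (Int × Int),
      M0 (((cand ++ cand.filterMap (fun p : Int × Int =>
              if p.2 + 1 ≤ k then some (PySem.Int.bor p.1 ((1 : Int) <<< i.toNat), p.2 + 1) else none))).map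
            (fun p => best os (k - p.2) p.1 w))
        = M0 (cand.map (fun p => best (i :: os) (k - p.2) p.1 w)) := by
  intro cand
  induction cand with
  | nil => simp
  | cons p cs ih =>
    simp only [List.map_append] at ih ⊢
    rw [M0_append] at ih ⊢
    by_cases hp : p.2 + 1 ≤ k
    · simp only [List.filterMap_cons, if_pos hp, List.map_cons]
      rw [M0_cons _ _ (best_nonneg _ _ _ _), M0_cons _ _ (best_nonneg _ _ _ _),
          M0_cons _ _ (best_nonneg _ _ _ _)]
      have harg : k - (p.2 + 1) = k - p.2 - 1 := by ring
      rw [harg]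
      simp only [best] at ih ⊢
      rw [if_pos (by omega : 1 ≤ k - p.2)]
      omega
    · simp only [List.filterMap_cons, if_neg hp, List.map_cons]
      rw [M0_cons _ _ (best_nonneg _ _ _ _), M0_cons _ _ (best_nonneg _ _ _ _)]
      simp only [best] at ih ⊢
      rw [if_neg (by omega : ¬ 1 ≤ k - p.2)]
      omega

-- the whole candidate fold computes `best`, relative to any starting candidate list
theorem fold_best (w : List Int) (k : Int) :
    ∀ (os : List Int) (cand : List (Int × Int)),
      M0 ((os.foldl (fun c i => c ++ c.filterMap (fun p =>
              if p.2 + 1 ≤ k then some (PySem.Int.bor p.1 ((1 : Int) <<< i.toNat), p.2 + 1) else none)) cand).map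
            (fun p => readWords p.1 w))
        = M0 (cand.map (fun p => best os (k - p.2) p.1 w)) := by
  intro os
  induction os with
  | nil => intro cand; simp [best]
  | cons i os ih =>
    intro cand
    rw [List.foldl_cons, ih, pair_step]

theorem fold_ne_nil {α β : Type} (g : List α → β → List α) (hg : ∀ c i, c ≠ [] → g c i ≠ []) :
    ∀ (L : List β) (c : List α), c ≠ [] → L.foldl g c ≠ [] := by
  intro L
  induction L with
  | nil => intro c hc; exact hc
  | cons a L ih => intro c hc; exact ih (g c a) (hg c a hc)

theorem match_eq_M0 (L : List Int) :
    L ≠ [] → (∀ x ∈ L, 0 ≤ x) →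
    (match L with | [] => (0 : Int) | v :: vs => vs.foldl max v) = M0 L := by
  match L with
  | [] => intro hL _; exact absurd rfl hL
  | v :: vs =>
    intro _ hpos
    have hv : 0 ≤ v := hpos v (List.mem_cons_self ..)
    simp only [M0, List.foldl_cons]
    congr 1
    omega

theorem solve_alt_eq_best (index k learned : Int) (w : List Int) (hk : 0 ≤ k) :
    solve_alt index k learned w = best (optsOf index) k learned w := by
  have hset : anticSet = ([0, 13, 19, 8, 2] : List Int) := by decide
  have hcont : PySem.Set.contains ([0, 13, 19, 8, 2] : PySem.Set Int)
      = ([0, 13, 19, 8, 2] : List Int).contains := rfl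
  simp only [solve_alt, if_neg (by omega : ¬ k < 0), hset, hcont]
  rw [foldl_if_skip (fun i => ([0, 13, 19, 8, 2] : List Int).contains i)]
  set g := fun (c : List (Int × Int)) (i : Int) => c ++ c.filterMap (fun p =>
      if p.2 + 1 ≤ k then some (PySem.Int.bor p.1 ((1 : Int) <<< i.toNat), p.2 + 1) else none) with hg
  set cands := (((PySem.List.pyRange index 26 1).filter
      (fun i => !([0, 13, 19, 8, 2] : List Int).contains i)).foldl g [(learned, 0)]) with hcands
  have hmapeq : (cands.map (fun p =>
        ((w.countP (fun x =>
          decide (PySem.Int.band x ((1 : Int) <<< (26 : Nat) - 1 - p.1) = 0))) : Int)))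
      = cands.map (fun p => readWords p.1 w) := by
    apply List.map_congr_left
    intro p _
    rw [readWords_eq_countP]
  rw [hmapeq]
  have hne : cands ≠ [] := by
    apply fold_ne_nil g _ _ [(learned, 0)] (by simp)
    intro c i hc
    simp only [hg]
    simp [hc]
  have hpos : ∀ x ∈ cands.map (fun p => readWords p.1 w), 0 ≤ x := by
    intro x hx
    obtain ⟨p, _, rfl⟩ := List.mem_map.mp hx
    exact readWords_nonneg p.1 w
  rw [match_eq_M0 _ (by simpa using hne) hpos]
  have := fold_best w k (((PySem.List.pyRange index 26 1).filter
      (fun i => !([0, 13, 19, 8, 2] : List Int).contains i))) [(learned, 0)]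
  rw [← hg, ← hcands] at this
  rw [this]
  simp only [List.map_cons, List.map_nil]
  rw [M0_cons _ _ (best_nonneg _ _ _ _)]
  simp only [M0, List.foldl_nil, sub_zero]
  have hnn := best_nonneg (optsOf index) k learned w
  simp only [optsOf] at hnn ⊢
  omega

-- ===== VERDICT (by name: the statement is the Claim_ definition above) =====
theorem solve_spec : Claim_equal_solve := by
  intro index k learned words _ hpre
  unfold Spec_solve
  by_cases hk : k < 0
  · rw [solve, solveAux_neg _ _ _ _ _ hk]
    simp only [solve_alt, if_pos hk]
  · have hk' : 0 ≤ k := by omega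
    have hidx : 0 ≤ index ∧ index ≤ 26 := by
      rcases hpre with h | h
      · omega
      · exact h
    rw [solve_alt_eq_best index k learned words hk']
    exact solveAux_eq_best (26 - index).toNat index k learned words (by omega) hidx.1 hk'
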